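-- pv_equiv track=rewrite | github.com/highlyunavailable/dynamic-ec2reservation | dynamic_ec2reservation/rebalance.py | get_change_diff
-- ===== SOURCE A (Python) =====
-- from copy import deepcopy
--
-- def get_change_diff(current, new):
--     """ Takes two os:netplatform:instancetype:az dictionaries and returns only
--     keys where the descendents are different.
--
--     :type current: dict
--     :param current: The current list of instances.
--     :type new: dict
--     :param new: The new list of instances.
--     :returns: dict
--     """
--     result = deepcopy(new)
--     if current == new:
--         return {}
--
--     for platform in current.keys():
--         if current[platform] == new.get(platform):
--             del result[platform]
--             continue
--
--         for netloc in current[platform].keys():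
--             if current[platform][netloc] == new[platform].get(netloc):
--                 del result[platform][netloc]
--                 continue
--
--             for instance_type in current[platform][netloc].keys():
--                 if current[platform][netloc][instance_type] == \
--                         new[platform][netloc].get(instance_type):
--                     del result[platform][netloc][instance_type]
--                     continue
--
--     return result
-- ===== SOURCE B (Python) =====
-- from copy import deepcopy
--
-- def _diff(cur, new, depth):
--     """Uniform one-level dict diff, recursing on values down to `depth` levels."""
--     result = deepcopy(new)
--     for k, v in cur.items():
--         if v == new.get(k):
--             del result[k]
--         elif depth > 0:
--             result[k] = _diff(v, new[k], depth - 1)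
--     return result
--
-- def get_change_diff(current, new):
--     if current == new:
--         return {}
--     return _diff(current, new, 2)
-- ===== Notes on version B (the rewrite author's own statement) =====
-- stated objective: simpler
-- what changed: A's three hand-unrolled nested loop levels (with level-specific del paths into the nested result) are replaced by one uniform per-level diff helper _diff(cur, new, depth) that deletes equal keys and writes back the recursive diff of differing values, applied at depth 2.
-- outside the precondition, e.g. on get_change_diff({'a': {}}, {}): A returns {}, B raises KeyError; on get_change_diff({'a': {'b': {}}}, {'a': {}}): A returns {'a': {}}, B raises KeyError
import Mathlib
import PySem

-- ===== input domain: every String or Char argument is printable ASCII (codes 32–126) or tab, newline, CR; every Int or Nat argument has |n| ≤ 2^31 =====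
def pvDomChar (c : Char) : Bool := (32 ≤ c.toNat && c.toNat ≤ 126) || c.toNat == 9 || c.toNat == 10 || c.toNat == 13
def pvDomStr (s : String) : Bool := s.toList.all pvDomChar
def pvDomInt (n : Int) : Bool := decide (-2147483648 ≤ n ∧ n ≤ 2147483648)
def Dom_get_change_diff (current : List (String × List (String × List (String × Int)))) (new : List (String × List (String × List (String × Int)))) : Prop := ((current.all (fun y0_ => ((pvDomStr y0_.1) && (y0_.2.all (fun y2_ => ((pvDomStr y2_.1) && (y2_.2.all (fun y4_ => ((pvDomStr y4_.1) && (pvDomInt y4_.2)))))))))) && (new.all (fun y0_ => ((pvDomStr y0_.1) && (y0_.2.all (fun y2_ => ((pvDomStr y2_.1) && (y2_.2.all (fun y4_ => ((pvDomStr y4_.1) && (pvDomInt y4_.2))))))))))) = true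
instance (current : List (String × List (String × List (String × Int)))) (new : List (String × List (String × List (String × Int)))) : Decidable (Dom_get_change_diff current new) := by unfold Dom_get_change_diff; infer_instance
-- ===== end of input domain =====

-- B replaces A's three hand-unrolled nested loop levels by one uniform per-level diff helper
-- applied recursively down to a fixed depth (objective: simpler decomposition, same cost).


-- Shared primitives: the dicts arrive as association lists (unique keys inside Pre_),
-- so Python's dict built-ins are ported as first-match operations on the list of pairs.
-- pvLk d k = d.get(k) (first match)
def pvLk {β : Type} (d : List (String × β)) (k : String) : Option β :=
  match d with
  | [] => none
  | (a, b) :: t => if a = k then some b else pvLk t k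

-- pvDel d k = `del d[k]` (removes the first pair with key k)
def pvDel {β : Type} (d : List (String × β)) (k : String) : List (String × β) :=
  match d with
  | [] => []
  | (a, b) :: t => if a = k then t else (a, b) :: pvDel t k

-- pvIns d k v = `d[k] = v` (overwrite in place, else append)
def pvIns {β : Type} (d : List (String × β)) (k : String) (v : β) : List (String × β) :=
  match d with
  | [] => [(k, v)]
  | (a, b) :: t => if a = k then (k, v) :: t else (a, b) :: pvIns t k v

-- pvMod d k f = replace the value at k (first match) by f of it; identity if k absent
def pvMod {β : Type} (d : List (String × β)) (k : String) (f : β → β) : List (String × β) :=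
  match d with
  | [] => []
  | (a, b) :: t => if a = k then (a, f b) :: t else (a, b) :: pvMod t k f

-- Python's `==` on dicts ignores insertion order: same keys, equal values (values compared
-- recursively by Python `==` again).  pvEq1/2/3 port it at each nesting depth.
def pvEq1 (a b : List (String × Int)) : Bool :=
  a.length == b.length && a.all (fun kv => pvLk b kv.1 == some kv.2)

def pvEq2 (a b : List (String × List (String × Int))) : Bool :=
  a.length == b.length && a.all (fun kv =>
    match pvLk b kv.1 with
    | some v => pvEq1 kv.2 v
    | none => false)

def pvEq3 (a b : List (String × List (String × List (String × Int)))) : Bool :=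
  a.length == b.length && a.all (fun kv =>
    match pvLk b kv.1 with
    | some v => pvEq2 kv.2 v
    | none => false)

-- ===== PORT A =====
-- A's innermost loop body: `if current[p][n][it] == new[p][n].get(it): del result[p][n][it]`
def pvA2 (nn : List (String × Int)) (p n : String)
    (r : List (String × List (String × List (String × Int)))) (ic : String × Int) :
    List (String × List (String × List (String × Int))) :=
  if pvLk nn ic.1 == some ic.2 then pvMod r p (fun d => pvMod d n (fun e => pvDel e ic.1)) else r

-- A's middle loop body over netlocs (np = new[p]; `none` = Python raised KeyError on new[p][n],
-- excluded by Pre_)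
def pvA1 (np : List (String × List (String × Int))) (p : String)
    (r : List (String × List (String × List (String × Int)))) (nc : String × List (String × Int)) :
    List (String × List (String × List (String × Int))) :=
  if pvEq1 nc.2 ((pvLk np nc.1).getD []) && (pvLk np nc.1).isSome then
    pvMod r p (fun d => pvDel d nc.1)
  else
    match pvLk np nc.1 with
    | none => r
    | some nn => nc.2.foldl (pvA2 nn p nc.1) r

-- A's outer loop body over platforms (`none` = Python raised KeyError on new[p], excluded by Pre_)
def pvA0 (new : List (String × List (String × List (String × Int))))
    (r : List (String × List (String × List (String × Int)))) (pc : String × List (String × List (String × Int))) :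
    List (String × List (String × List (String × Int))) :=
  if pvEq2 pc.2 ((pvLk new pc.1).getD []) && (pvLk new pc.1).isSome then
    pvDel r pc.1
  else
    match pvLk new pc.1 with
    | none => r
    | some np => pc.2.foldl (pvA1 np pc.1) r

def get_change_diff (current : List (String × List (String × List (String × Int)))) (new : List (String × List (String × List (String × Int)))) : List (String × List (String × List (String × Int))) :=
  -- result = deepcopy(new); if current == new: return {}; three nested for-loops over current
  if pvEq3 current new then [] else current.foldl (pvA0 new) new

-- ===== PORT B =====
-- Source B's _diff at depth 0: result = deepcopy(new); del result[k] when v == new.get(k)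
def pvB0 (new : List (String × Int)) (res : List (String × Int)) (kv : String × Int) :
    List (String × Int) :=
  if pvLk new kv.1 == some kv.2 then pvDel res kv.1 else res

def pvDiff0 (cur new : List (String × Int)) : List (String × Int) :=
  cur.foldl (pvB0 new) new

-- _diff at depth 1: equal → del; different → result[k] = _diff(v, new[k], 0)
-- (`none` = Python raised KeyError on new[k], excluded by Pre_)
def pvB1 (new : List (String × List (String × Int))) (res : List (String × List (String × Int)))
    (kv : String × List (String × Int)) : List (String × List (String × Int)) :=
  match pvLk new kv.1 with
  | none => res
  | some nv => if pvEq1 kv.2 nv then pvDel res kv.1 else pvIns res kv.1 (pvDiff0 kv.2 nv)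

def pvDiff1 (cur new : List (String × List (String × Int))) : List (String × List (String × Int)) :=
  cur.foldl (pvB1 new) new

-- _diff at depth 2: equal → del; different → result[k] = _diff(v, new[k], 1)
def pvB2 (new : List (String × List (String × List (String × Int))))
    (res : List (String × List (String × List (String × Int))))
    (kv : String × List (String × List (String × Int))) :
    List (String × List (String × List (String × Int))) :=
  match pvLk new kv.1 with
  | none => res
  | some nv => if pvEq2 kv.2 nv then pvDel res kv.1 else pvIns res kv.1 (pvDiff1 kv.2 nv)

def pvDiff2 (cur new : List (String × List (String × List (String × Int)))) :
    List (String × List (String × List (String × Int))) :=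
  cur.foldl (pvB2 new) new

def get_change_diff_alt (current : List (String × List (String × List (String × Int)))) (new : List (String × List (String × List (String × Int)))) : List (String × List (String × List (String × Int))) :=
  if pvEq3 current new then [] else pvDiff2 current new

-- ===== PRECONDITION & SPEC =====
-- Keys at every level are distinct (the lists stand for Python dicts, which cannot carry
-- duplicate keys), and no KeyError: every platform key of current is present in new, and every
-- netloc key of current is present in new's sub-dict for that platform.  This also excludes
-- inputs where a current-only key maps to an EMPTY sub-dict: there A happens to return (its
-- inner loop over the empty dict never reaches the raising index new[k]), while B's recursive
-- diff raises KeyError.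
def pvNodup3 (l : List (String × List (String × List (String × Int)))) : Prop :=
  (l.map Prod.fst).Nodup ∧
  ∀ pc ∈ l, (pc.2.map Prod.fst).Nodup ∧ ∀ nc ∈ pc.2, (nc.2.map Prod.fst).Nodup

def Pre_get_change_diff (current : List (String × List (String × List (String × Int)))) (new : List (String × List (String × List (String × Int)))) : Prop :=
  pvNodup3 current ∧ pvNodup3 new ∧
  ∀ pc ∈ current, ∃ np ∈ new, np.1 = pc.1 ∧ ∀ nc ∈ pc.2, nc.1 ∈ np.2.map Prod.fst
instance (current : List (String × List (String × List (String × Int)))) (new : List (String × List (String × List (String × Int)))) : Decidable (Pre_get_change_diff current new) := by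
  unfold Pre_get_change_diff pvNodup3; infer_instance

def pvWitness_get_change_diff : (List (String × List (String × List (String × Int)))) × (List (String × List (String × List (String × Int)))) :=
  ([("linux", [("vpc", [("m1.small", 1)])])], [("linux", [("vpc", [("m1.small", 2)])]), ("win", [])])

def Spec_get_change_diff (current : List (String × List (String × List (String × Int)))) (new : List (String × List (String × List (String × Int)))) (out : List (String × List (String × List (String × Int)))) : Prop := out = get_change_diff_alt current new
instance (current : List (String × List (String × List (String × Int)))) (new : List (String × List (String × List (String × Int)))) (out : List (String × List (String × List (String × Int)))) : Decidable (Spec_get_change_diff current new out) := by unfold Spec_get_change_diff; infer_instance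

-- ===== CLAIM (what is proved, stated in full; the proofs are below) =====
def Claim_equal_get_change_diff : Prop := ∀ (current : List (String × List (String × List (String × Int)))) (new : List (String × List (String × List (String × Int)))), Dom_get_change_diff current new → Pre_get_change_diff current new → Spec_get_change_diff current new (get_change_diff current new)

-- ===== LEMMAS AND PROOFS =====

theorem pvLk_del_ne {β : Type} (d : List (String × β)) {q p : String} (h : q ≠ p) :
    pvLk (pvDel d p) q = pvLk d q := by
  induction d with
  | nil => rfl
  | cons hd t ih =>
    obtain ⟨a, b⟩ := hd
    by_cases hap : a = p
    · subst hap
      simp [pvDel, pvLk, Ne.symm h]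
    · by_cases haq : a = q <;> simp [pvDel, pvLk, hap, haq, h, ih]

theorem pvLk_ins_ne {β : Type} (d : List (String × β)) {q p : String} (v : β) (h : q ≠ p) :
    pvLk (pvIns d p v) q = pvLk d q := by
  induction d with
  | nil => simp [pvIns, pvLk, Ne.symm h]
  | cons hd t ih =>
    obtain ⟨a, b⟩ := hd
    by_cases hap : a = p
    · subst hap
      simp [pvIns, pvLk, Ne.symm h]
    · by_cases haq : a = q <;> simp [pvIns, pvLk, hap, haq, h, ih]

theorem pvLk_mod_self {β : Type} (d : List (String × β)) (p : String) (f : β → β) :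
    pvLk (pvMod d p f) p = (pvLk d p).map f := by
  induction d with
  | nil => rfl
  | cons hd t ih =>
    obtain ⟨a, b⟩ := hd
    by_cases hap : a = p <;> simp [pvMod, pvLk, hap, ih]

theorem pvLk_ins_self {β : Type} (d : List (String × β)) (p : String) (v : β) :
    pvLk (pvIns d p v) p = some v := by
  induction d with
  | nil => simp [pvIns, pvLk]
  | cons hd t ih =>
    obtain ⟨a, b⟩ := hd
    by_cases hap : a = p <;> simp [pvIns, pvLk, hap, ih]

theorem pvIns_mod {β : Type} (d : List (String × β)) (p : String) (f : β → β) (v : β) :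
    pvIns (pvMod d p f) p v = pvIns d p v := by
  induction d with
  | nil => rfl
  | cons hd t ih =>
    obtain ⟨a, b⟩ := hd
    by_cases hap : a = p <;> simp [pvMod, pvIns, hap, ih]

theorem pvIns_ins {β : Type} (d : List (String × β)) (p : String) (v w : β) :
    pvIns (pvIns d p v) p w = pvIns d p w := by
  induction d with
  | nil => simp [pvIns]
  | cons hd t ih =>
    obtain ⟨a, b⟩ := hd
    by_cases hap : a = p <;> simp [pvIns, hap, ih]

theorem pvIns_lk {β : Type} (d : List (String × β)) (p : String) (v : β)
    (h : pvLk d p = some v) : pvIns d p v = d := by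
  induction d with
  | nil => simp [pvLk] at h
  | cons hd t ih =>
    obtain ⟨a, b⟩ := hd
    by_cases hap : a = p
    · subst hap
      simp [pvLk] at h
      simp [pvIns, h]
    · simp [pvLk, hap] at h
      simp [pvIns, hap, ih h]

-- A's innermost loop, rephrased: it only edits result[p][n], so it equals writing back the
-- one-level diff pvDiff0-style fold into the nested position.
theorem pvInner2 (nn : List (String × Int)) (p n : String) :
    ∀ (nv : List (String × Int)) (r : List (String × List (String × List (String × Int))))
      (d : List (String × List (String × Int))) (e : List (String × Int)),
      pvLk r p = some d → pvLk d n = some e →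
      nv.foldl (pvA2 nn p n) r = pvIns r p (pvIns d n (nv.foldl (pvB0 nn) e)) := by
  intro nv
  induction nv with
  | nil =>
    intro r d e hr hd
    simp [List.foldl, pvIns_lk _ _ _ hd, pvIns_lk _ _ _ hr]
  | cons ic rest ih =>
    intro r d e hr hd
    by_cases hc : pvLk nn ic.1 == some ic.2
    · have h1 : pvLk (pvMod r p (fun d => pvMod d n (fun e => pvDel e ic.1))) p
          = some (pvMod d n (fun e => pvDel e ic.1)) := by
        rw [pvLk_mod_self, hr]; rfl
      have h2 : pvLk (pvMod d n (fun e => pvDel e ic.1)) n = some (pvDel e ic.1) := by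
        rw [pvLk_mod_self, hd]; rfl
      simp only [List.foldl, pvA2, hc, if_true, pvB0]
      rw [ih _ _ _ h1 h2, pvIns_mod, pvIns_mod]
    · simp only [List.foldl, pvA2, hc, pvB0]
      exact ih _ _ _ hr hd

-- A's middle loop at platform p equals writing back B's one-level-lower fold into result[p].
theorem pvInner1 (np : List (String × List (String × Int))) (p : String) :
    ∀ (cv : List (String × List (String × Int)))
      (r : List (String × List (String × List (String × Int))))
      (d : List (String × List (String × Int))),
      (cv.map Prod.fst).Nodup → pvLk r p = some d →
      (∀ nc ∈ cv, pvLk d nc.1 = pvLk np nc.1) →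
      cv.foldl (pvA1 np p) r = pvIns r p (cv.foldl (pvB1 np) d) := by
  intro cv
  induction cv with
  | nil =>
    intro r d _ hr _
    simp [List.foldl, pvIns_lk _ _ _ hr]
  | cons nc rest ih =>
    intro r d hnd hr hlk
    have hndr : (rest.map Prod.fst).Nodup := (List.nodup_cons.mp hnd).2
    have hne : ∀ mc ∈ rest, mc.1 ≠ nc.1 := by
      intro mc hm heq
      exact (List.nodup_cons.mp hnd).1 (heq ▸ List.mem_map_of_mem hm)
    have hlkn : pvLk d nc.1 = pvLk np nc.1 := hlk nc (List.mem_cons_self ..)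
    simp only [List.foldl, pvA1, pvB1]
    cases hnp : pvLk np nc.1 with
    | none =>
      simp only [Option.getD_none, Option.isSome_none, Bool.and_false]
      exact ih _ _ hndr hr (fun mc hm => hlk mc (List.mem_cons_of_mem _ hm))
    | some nn =>
      simp only [Option.getD_some, Option.isSome_some, Bool.and_true]
      by_cases heq : pvEq1 nc.2 nn
      · have h1 : pvLk (pvMod r p (fun d => pvDel d nc.1)) p = some (pvDel d nc.1) := by
          rw [pvLk_mod_self, hr]; rfl
        have hlk' : ∀ mc ∈ rest, pvLk (pvDel d nc.1) mc.1 = pvLk np mc.1 := by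
          intro mc hm
          rw [pvLk_del_ne _ (hne mc hm)]
          exact hlk mc (List.mem_cons_of_mem _ hm)
        simp only [heq, if_true]
        rw [ih _ _ hndr h1 hlk', pvIns_mod]
      · simp only [heq, Bool.false_eq_true, if_false]
        have he : pvLk d nc.1 = some nn := by rw [hlkn, hnp]
        rw [pvInner2 nn p nc.1 nc.2 r d nn hr he]
        have h1 : pvLk (pvIns r p (pvIns d nc.1 (nc.2.foldl (pvB0 nn) nn))) p
            = some (pvIns d nc.1 (nc.2.foldl (pvB0 nn) nn)) := pvLk_ins_self ..
        have hlk' : ∀ mc ∈ rest,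
            pvLk (pvIns d nc.1 (nc.2.foldl (pvB0 nn) nn)) mc.1 = pvLk np mc.1 := by
          intro mc hm
          rw [pvLk_ins_ne _ _ (hne mc hm)]
          exact hlk mc (List.mem_cons_of_mem _ hm)
        rw [ih _ _ hndr h1 hlk', pvIns_ins]
        rfl

-- B's one step preserves lookups at other keys.
theorem pvB2_lk_ne (new r : List (String × List (String × List (String × Int))))
    (pc : String × List (String × List (String × Int))) {q : String} (h : q ≠ pc.1) :
    pvLk (pvB2 new r pc) q = pvLk r q := by
  unfold pvB2
  cases pvLk new pc.1 with
  | none => rfl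
  | some np =>
    by_cases heq : pvEq2 pc.2 np <;>
      simp [heq, pvLk_del_ne _ h, pvLk_ins_ne _ _ h]

-- A's outer loop equals B's outer loop, step by step.
theorem pvTop (new : List (String × List (String × List (String × Int)))) :
    ∀ (current : List (String × List (String × List (String × Int))))
      (r : List (String × List (String × List (String × Int)))),
      (current.map Prod.fst).Nodup →
      (∀ pc ∈ current, (pc.2.map Prod.fst).Nodup) →
      (∀ pc ∈ current, pvLk r pc.1 = pvLk new pc.1) →
      current.foldl (pvA0 new) r = current.foldl (pvB2 new) r := by
  intro current
  induction current with
  | nil => intro r _ _ _; rfl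
  | cons pc rest ih =>
    intro r hnd hnd2 hlk
    have hndr : (rest.map Prod.fst).Nodup := (List.nodup_cons.mp hnd).2
    have hne : ∀ qc ∈ rest, qc.1 ≠ pc.1 := by
      intro qc hm heq
      exact (List.nodup_cons.mp hnd).1 (heq ▸ List.mem_map_of_mem hm)
    have hlkp : pvLk r pc.1 = pvLk new pc.1 := hlk pc (List.mem_cons_self ..)
    have hstep : pvA0 new r pc = pvB2 new r pc := by
      unfold pvA0 pvB2
      cases hnp : pvLk new pc.1 with
      | none => simp
      | some np =>
        simp only [Option.getD_some, Option.isSome_some, Bool.and_true]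
        by_cases heq : pvEq2 pc.2 np
        · simp [heq]
        · simp only [heq, if_false, Bool.false_eq_true]
          have hd : pvLk r pc.1 = some np := by rw [hlkp, hnp]
          rw [pvInner1 np pc.1 pc.2 r np (hnd2 pc (List.mem_cons_self ..)) hd
            (fun nc _ => rfl)]
          rfl
    simp only [List.foldl, hstep]
    refine ih _ hndr (fun qc hm => hnd2 qc (List.mem_cons_of_mem _ hm)) ?_
    intro qc hm
    rw [pvB2_lk_ne new r pc (hne qc hm)]
    exact hlk qc (List.mem_cons_of_mem _ hm)

-- ===== VERDICT (by name: the statement is the Claim_ definition above) =====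
theorem get_change_diff_spec : Claim_equal_get_change_diff := by
  intro current new _ hpre
  unfold Spec_get_change_diff get_change_diff get_change_diff_alt pvDiff2
  by_cases h3 : pvEq3 current new
  · simp [h3]
  · simp only [h3, if_false, Bool.false_eq_true]
    exact pvTop new current new hpre.1.1 (fun pc hm => (hpre.1.2 pc hm).1) (fun _ _ => rfl)
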